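-- pv_equiv track=rewrite | github.com/PaErHaTi-DUTiR/BiLegalNER | cutlm.py | mark_entities
-- ===== SOURCE A (Python) =====
-- def mark_entities(tokens, tags):
--     marked_tokens = []
--     inside_entity = False
--     for token, tag in zip(tokens, tags):
--         if tag.startswith('B-'):
--             if inside_entity:
--                 marked_tokens.append(']')
--                 inside_entity = False
--             marked_tokens.append('[')
--             marked_tokens.append(token)
--             inside_entity = True
--         elif tag.startswith('I-'):
--             marked_tokens.append(token)
--         else:
--             if inside_entity:
--                 marked_tokens.append(']')
--                 inside_entity = False
--             marked_tokens.append(token)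
--     if inside_entity:
--         marked_tokens.append(']')
--     return ''.join(marked_tokens)
-- ===== SOURCE B (Python) =====
-- def mark_entities(tokens, tags):
--     # Chunk decomposition: consume maximal entity runs (B- followed by I-*) as
--     # bracketed chunks, other tokens as plain chunks, then join.
--     pairs = list(zip(tokens, tags))
--     n = len(pairs)
--     chunks = []
--     i = 0
--     while i < n:
--         tok, tag = pairs[i]
--         if tag.startswith('B-'):
--             j = i + 1
--             while j < n and pairs[j][1].startswith('I-'):
--                 j += 1
--             chunks.append('[' + ''.join(t for t, _ in pairs[i:j]) + ']')
--             i = j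
--         else:
--             chunks.append(tok)
--             i += 1
--     return ''.join(chunks)
-- ===== Notes on version B (the rewrite author's own statement) =====
-- stated objective: alternative
-- what changed: Replaced A's single-pass state machine with an inside_entity flag by a chunking pass: an outer loop that consumes each maximal entity run (a 'B-' tag plus its following 'I-' tags) via an inner scan and emits it as one bracketed chunk, plain tokens as single chunks, then joins the chunks.
import Mathlib
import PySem

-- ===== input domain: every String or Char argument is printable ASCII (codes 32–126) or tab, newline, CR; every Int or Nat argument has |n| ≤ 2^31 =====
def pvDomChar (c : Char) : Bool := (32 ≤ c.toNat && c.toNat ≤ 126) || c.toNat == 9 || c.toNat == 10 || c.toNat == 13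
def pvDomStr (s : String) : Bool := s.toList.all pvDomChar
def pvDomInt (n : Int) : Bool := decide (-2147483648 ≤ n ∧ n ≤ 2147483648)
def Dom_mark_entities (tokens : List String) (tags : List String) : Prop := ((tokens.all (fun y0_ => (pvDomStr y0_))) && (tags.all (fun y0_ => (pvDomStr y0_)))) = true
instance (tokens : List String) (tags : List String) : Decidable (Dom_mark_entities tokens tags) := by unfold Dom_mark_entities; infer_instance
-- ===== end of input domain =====

-- B re-implements A by a different decomposition: chunk the zipped input into
-- bracketed entity runs (B- plus following I-'s) and plain tokens, then join;
-- A is a single-pass state machine with an inside_entity flag. Same return value.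


-- ===== PORT A =====
-- loop body of A: state = (marked_tokens so far, inside_entity)
def markAStep (st : List String × Bool) (p : String × String) : List String × Bool :=
  if PySem.Str.startswith p.2 "B-" then
    ((if st.2 then st.1 ++ ["]"] else st.1) ++ ["[", p.1], true)
  else if PySem.Str.startswith p.2 "I-" then
    (st.1 ++ [p.1], st.2)
  else
    ((if st.2 then st.1 ++ ["]"] else st.1) ++ [p.1], false)

def mark_entities (tokens : List String) (tags : List String) : String :=
  let st := (tokens.zip tags).foldl markAStep ([], false)
  PySem.Str.join "" (if st.2 then st.1 ++ ["]"] else st.1)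

-- ===== PORT B =====
-- B's outer while loop: consume one chunk per step (the inner while over I- tags
-- becomes takeWhile/dropWhile of the I- prefix)
def markBChunks : List (String × String) → List String
  | [] => []
  | (tok, tag) :: rest =>
    if PySem.Str.startswith tag "B-" then
      let run := rest.takeWhile (fun p => PySem.Str.startswith p.2 "I-")
      let rest' := rest.dropWhile (fun p => PySem.Str.startswith p.2 "I-")
      ("[" ++ tok ++ PySem.Str.join "" (run.map Prod.fst) ++ "]") :: markBChunks rest'
    else
      tok :: markBChunks rest
termination_by l => l.length
decreasing_by
  · exact Nat.lt_succ_of_le (List.length_dropWhile_le _ _)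
  · simp

def mark_entities_alt (tokens : List String) (tags : List String) : String :=
  PySem.Str.join "" (markBChunks (tokens.zip tags))

-- ===== PRECONDITION & SPEC =====
def Spec_mark_entities (tokens : List String) (tags : List String) (out : String) : Prop := out = mark_entities_alt tokens tags
instance (tokens : List String) (tags : List String) (out : String) : Decidable (Spec_mark_entities tokens tags out) := by unfold Spec_mark_entities; infer_instance

-- ===== CLAIM (what is proved, stated in full; the proofs are below) =====
def Claim_equal_mark_entities : Prop := ∀ (tokens : List String) (tags : List String), Dom_mark_entities tokens tags → Spec_mark_entities tokens tags (mark_entities tokens tags)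

-- ===== LEMMAS AND PROOFS =====

-- recursive characterization of A's loop result (pieces still unjoined)
def markAux : List (String × String) → Bool → List String
  | [], inside => if inside then ["]"] else []
  | (tok, tag) :: rest, inside =>
    if PySem.Str.startswith tag "B-" then
      (if inside then ["]"] else []) ++ "[" :: tok :: markAux rest true
    else if PySem.Str.startswith tag "I-" then
      tok :: markAux rest inside
    else
      (if inside then ["]"] else []) ++ tok :: markAux rest false

theorem foldA_eq_markAux (pairs : List (String × String)) :
    ∀ (acc : List String) (inside : Bool),
    (if (pairs.foldl markAStep (acc, inside)).2 then
        (pairs.foldl markAStep (acc, inside)).1 ++ ["]"]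
      else (pairs.foldl markAStep (acc, inside)).1) = acc ++ markAux pairs inside := by
  induction pairs with
  | nil => intro acc inside; cases inside <;> simp [markAux]
  | cons p rest ih =>
    intro acc inside
    obtain ⟨tok, tag⟩ := p
    simp only [List.foldl_cons, markAStep, markAux]
    by_cases hB : PySem.Chars.startswith tag.toList ['B', '-'] = true
    · cases inside <;> simp [hB, ih]
    · by_cases hI : PySem.Chars.startswith tag.toList ['I', '-'] = true
      · cases inside <;> simp [hB, hI, ih]
      · cases inside <;> simp [hB, hI, ih]

-- "".join splits off the head piece
theorem join0_cons (x : String) (l : List String) :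
    PySem.Str.join "" (x :: l) = x ++ PySem.Str.join "" l := by
  apply String.ext
  cases l with
  | nil =>
    simp [PySem.Str.toList_join, PySem.Chars.join, List.intercalate]
  | cons y l =>
    simp only [PySem.Str.toList_join, List.map_cons]
    rw [show ("" : String).toList = [] from rfl, PySem.Chars.join_cons_cons]
    simp

-- when the tail starts with a non-I- tag (or is empty), being inside an entity
-- just contributes the closing bracket
theorem markAux_true_of_not_I (l : List (String × String))
    (h : ∀ tok tag rest, l = (tok, tag) :: rest → PySem.Chars.startswith tag.toList ['I', '-'] = false) :
    markAux l true = "]" :: markAux l false := by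
  cases l with
  | nil => simp [markAux]
  | cons p rest =>
    obtain ⟨tok, tag⟩ := p
    have hI := h tok tag rest rfl
    by_cases hB : PySem.Chars.startswith tag.toList ['B', '-'] = true <;> simp [markAux, hB, hI]

-- A inside an entity = the I- run's tokens, the closing bracket, then B's chunks
-- of the remainder (given the main equation on lists no longer than l)
theorem markAux_true_split (l : List (String × String))
    (H : ∀ m : List (String × String), m.length ≤ l.length →
      PySem.Str.join "" (markAux m false) = PySem.Str.join "" (markBChunks m)) :
    PySem.Str.join "" (markAux l true) =
      PySem.Str.join "" ((l.takeWhile (fun p => PySem.Str.startswith p.2 "I-")).map Prod.fst)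
        ++ ("]" ++ PySem.Str.join "" (markBChunks (l.dropWhile (fun p => PySem.Str.startswith p.2 "I-")))) := by
  induction l with
  | nil => simp [markAux, markBChunks, PySem.Str.join, PySem.Chars.join, List.intercalate]
  | cons p rest ih =>
    obtain ⟨tok, tag⟩ := p
    by_cases hI : PySem.Chars.startswith tag.toList ['I', '-'] = true
    · have hA : markAux ((tok, tag) :: rest) true = tok :: markAux rest true := by
        by_cases hB' : PySem.Chars.startswith tag.toList ['B', '-'] = true
        · exfalso
          -- a tag cannot start with both "B-" and "I-"
          rw [PySem.Chars.startswith_iff] at hB' hI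
          rcases hB' with ⟨t1, h1⟩; rcases hI with ⟨t2, h2⟩
          rw [← h2] at h1
          simp at h1
        · simp [markAux, hB', hI]
      rw [hA, join0_cons]
      rw [ih (fun m hm => H m (le_trans hm (Nat.le_succ _)))]
      simp [hI, join0_cons, String.append_assoc]
    · have hstep : markAux ((tok, tag) :: rest) true = "]" :: markAux ((tok, tag) :: rest) false :=
        markAux_true_of_not_I _ (by
          intro a b c hc
          injection hc with h1 h2
          cases h1
          exact eq_false_of_ne_true hI)
      rw [hstep, join0_cons, H _ (le_refl _)]
      simp [hI, PySem.Str.join, PySem.Chars.join,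
        List.intercalate]

-- main equation: A's pieces join to B's chunks' join
theorem markAux_eq_chunks (n : Nat) :
    ∀ l : List (String × String), l.length ≤ n →
      PySem.Str.join "" (markAux l false) = PySem.Str.join "" (markBChunks l) := by
  induction n with
  | zero =>
    intro l hl
    have h0 : l = [] := List.length_eq_zero_iff.mp (Nat.le_zero.mp hl)
    subst h0; rw [markBChunks]; simp [markAux]
  | succ n ih =>
    intro l hl
    cases l with
    | nil => rw [markBChunks]; simp [markAux]
    | cons p rest =>
      obtain ⟨tok, tag⟩ := p
      simp only [List.length_cons, Nat.succ_le_succ_iff] at hl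
      by_cases hB : PySem.Chars.startswith tag.toList ['B', '-'] = true
      · have hsplit := markAux_true_split rest (fun m hm => ih m (le_trans hm hl))
        have hA : markAux ((tok, tag) :: rest) false = "[" :: tok :: markAux rest true := by
          simp [markAux, hB]
        have hC : markBChunks ((tok, tag) :: rest) =
            ("[" ++ tok ++
              PySem.Str.join "" ((rest.takeWhile (fun p => PySem.Str.startswith p.2 "I-")).map Prod.fst)
              ++ "]") :: markBChunks (rest.dropWhile (fun p => PySem.Str.startswith p.2 "I-")) := by
          rw [markBChunks]; simp [hB]
        rw [hA, hC, join0_cons, join0_cons, hsplit, join0_cons]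
        simp [String.append_assoc]
      · have hA : markAux ((tok, tag) :: rest) false = tok :: markAux rest false := by
          by_cases hI : PySem.Chars.startswith tag.toList ['I', '-'] = true <;>
            simp [markAux, hB, hI]
        have hC : markBChunks ((tok, tag) :: rest) = tok :: markBChunks rest := by
          rw [markBChunks]; simp [hB]
        rw [hA, hC, join0_cons, join0_cons, ih rest hl]

-- ===== VERDICT (by name: the statement is the Claim_ definition above) =====
theorem mark_entities_spec : Claim_equal_mark_entities := by
  intro tokens tags _
  show mark_entities tokens tags = mark_entities_alt tokens tags
  simp only [mark_entities, mark_entities_alt]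
  rw [foldA_eq_markAux (tokens.zip tags) [] false]
  exact markAux_eq_chunks (tokens.zip tags).length (tokens.zip tags) (le_refl _)
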